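-- pv_equiv track=rewrite | github.com/lsdudnik/home | 25017874/23/23.6) 5065.py | f
-- ===== SOURCE A (Python) =====
-- def f(cur, end, flag):
-- 	if '5' in str(cur):
-- 		flag += 1
-- 	if cur == end and flag == 0:
-- 		return 1
-- 	elif cur > end:
-- 		return 0
-- 	else:
-- 		return f(cur + 1, end, flag) + f(cur * 2, end, flag)
-- ===== SOURCE B (Python) =====
-- def f(cur, end, flag):
--     memo = {}
--
--     def go(cur, flag):
--         key = (cur, flag)
--         if key in memo:
--             return memo[key]
--         fl = flag + 1 if '5' in str(cur) else flag
--         if cur == end and fl == 0: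
--             res = 1
--         elif cur > end:
--             res = 0
--         else:
--             res = go(cur + 1, fl) + go(cur * 2, fl)
--         memo[key] = res
--         return res
--
--     return go(cur, flag)
-- ===== Notes on version B (the rewrite author's own statement) =====
-- stated objective: faster
-- what changed: B memoizes the recursion on the (cur, flag) state in a dictionary, so each state is evaluated once (DP) instead of re-exploring the exponential call tree; Pre_ excludes inputs (cur <= 0 with cur < end, or cur = end <= 0 with effective flag nonzero) on which A recurses forever.
import Mathlib
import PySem

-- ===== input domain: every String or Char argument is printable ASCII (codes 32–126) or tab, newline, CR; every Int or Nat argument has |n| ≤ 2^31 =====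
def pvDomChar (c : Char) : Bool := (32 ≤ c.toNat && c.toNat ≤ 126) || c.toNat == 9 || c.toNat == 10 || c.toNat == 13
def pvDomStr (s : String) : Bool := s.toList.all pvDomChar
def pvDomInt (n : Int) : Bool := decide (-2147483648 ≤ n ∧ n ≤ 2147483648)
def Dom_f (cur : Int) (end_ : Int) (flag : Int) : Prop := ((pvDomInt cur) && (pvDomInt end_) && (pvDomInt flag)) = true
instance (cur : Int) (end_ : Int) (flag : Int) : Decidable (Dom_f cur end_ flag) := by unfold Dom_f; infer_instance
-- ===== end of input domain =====

-- B memoizes the recursion on the (cur, flag) state, evaluating each state once (DP)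
-- instead of A's exponential call tree.  Equivalence is claimed on Pre_f, the inputs
-- where the Python A terminates.

-- ===== PORT A =====
-- '5' in str(cur)
def pvH5 (n : Int) : Bool := PySem.Str.isIn "5" (PySem.Int.toStr n)

-- A's recursion, with a fuel guard that only makes the recursion structurally total;
-- on Pre_f the fuel chosen in `f` is sufficient (proved below).
def fA : Nat → Int → Int → Int → Int
  | 0, _, _, _ => 0
  | n+1, cur, end_, flag =>
    let flag1 := if pvH5 cur then flag + 1 else flag
    if cur = end_ ∧ flag1 = 0 then 1
    else if end_ < cur then 0
    else fA n (cur + 1) end_ flag1 + fA n (cur * 2) end_ flag1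

def f (cur : Int) (end_ : Int) (flag : Int) : Int :=
  fA ((end_ - cur).toNat + 2) cur end_ flag

-- ===== PORT B =====
-- B's memoized recursion: the dictionary `memo` maps visited (cur, flag) states to
-- their results and is threaded through the computation; same fuel guard as A's port.
def fB : Nat → Int → Int → Int → PySem.Dict (Int × Int) Int →
    Int × PySem.Dict (Int × Int) Int
  | 0, _, _, _, m => (0, m)
  | n+1, cur, end_, flag, m =>
    match m.get? (cur, flag) with
    | some v => (v, m)
    | none =>
      let fl := if pvH5 cur then flag + 1 else flag
      if cur = end_ ∧ fl = 0 then (1, m.insert (cur, flag) 1)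
      else if end_ < cur then (0, m.insert (cur, flag) 0)
      else
        let r1 := fB n (cur + 1) end_ fl m
        let r2 := fB n (cur * 2) end_ fl r1.2
        (r1.1 + r2.1, r2.2.insert (cur, flag) (r1.1 + r2.1))

def f_alt (cur : Int) (end_ : Int) (flag : Int) : Int :=
  (fB ((end_ - cur).toNat + 2) cur end_ flag PySem.Dict.empty).1

-- ===== PRECONDITION & SPEC =====
-- Pre_f excludes exactly the inputs on which the Python A recurses forever
-- (cur ≤ 0 with cur < end, and cur = end ≤ 0 with nonzero effective flag):
-- there A never returns.
def Pre_f (cur : Int) (end_ : Int) (flag : Int) : Prop :=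
  end_ < cur ∨ 1 ≤ cur ∨ (cur = end_ ∧ (if pvH5 cur then flag + 1 else flag) = 0)
instance (cur : Int) (end_ : Int) (flag : Int) : Decidable (Pre_f cur end_ flag) := by
  unfold Pre_f; infer_instance

def pvWitness_f : Int × Int × Int := (1, 10, 0)

def Spec_f (cur : Int) (end_ : Int) (flag : Int) (out : Int) : Prop := out = f_alt cur end_ flag
instance (cur : Int) (end_ : Int) (flag : Int) (out : Int) : Decidable (Spec_f cur end_ flag out) := by
  unfold Spec_f; infer_instance

-- ===== CLAIM (what is proved, stated in full; the proofs are below) =====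
def Claim_equal_f : Prop := ∀ (cur : Int) (end_ : Int) (flag : Int),
  Dom_f cur end_ flag → Pre_f cur end_ flag → Spec_f cur end_ flag (f cur end_ flag)

-- ===== LEMMAS AND PROOFS =====

-- the effective flag after visiting `cur`
def pvFl (cur flag : Int) : Int := if pvH5 cur then flag + 1 else flag

-- required fuel for a start value `cur`
def pvD (end_ cur : Int) : Nat := (end_ - cur).toNat + 2

theorem fA_succ (n : Nat) (cur end_ flag : Int) :
    fA (n+1) cur end_ flag =
      if cur = end_ ∧ pvFl cur flag = 0 then 1
      else if end_ < cur then 0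
      else fA n (cur + 1) end_ (pvFl cur flag) + fA n (cur * 2) end_ (pvFl cur flag) := rfl

theorem fB_succ (n : Nat) (cur end_ flag : Int) (m : PySem.Dict (Int × Int) Int) :
    fB (n+1) cur end_ flag m =
      match m.get? (cur, flag) with
      | some v => (v, m)
      | none =>
        if cur = end_ ∧ pvFl cur flag = 0 then (1, m.insert (cur, flag) 1)
        else if end_ < cur then (0, m.insert (cur, flag) 0)
        else
          (((fB n (cur + 1) end_ (pvFl cur flag) m).1 +
            (fB n (cur * 2) end_ (pvFl cur flag) (fB n (cur + 1) end_ (pvFl cur flag) m).2).1),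
           ((fB n (cur * 2) end_ (pvFl cur flag) (fB n (cur + 1) end_ (pvFl cur flag) m).2).2.insert
             (cur, flag)
             ((fB n (cur + 1) end_ (pvFl cur flag) m).1 +
              (fB n (cur * 2) end_ (pvFl cur flag) (fB n (cur + 1) end_ (pvFl cur flag) m).2).1))) := rfl

-- past the end, any positive fuel gives 0
theorem fA_gt (n : Nat) (cur end_ flag : Int) (h1 : 1 ≤ n) (h2 : end_ < cur) :
    fA n cur end_ flag = 0 := by
  match n, h1 with
  | n+1, _ =>
    rw [fA_succ]
    have hne : ¬ (cur = end_ ∧ pvFl cur flag = 0) := by rintro ⟨rfl, -⟩; omega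
    rw [if_neg hne, if_pos h2]

-- fuel irrelevance on the terminating region 1 ≤ cur
theorem fA_fuel (n : Nat) : ∀ (cur end_ flag : Int), 1 ≤ cur → pvD end_ cur ≤ n →
    fA n cur end_ flag = fA (pvD end_ cur) cur end_ flag := by
  induction n using Nat.strong_induction_on with
  | _ n IH =>
    intro cur end_ flag hcur hn
    have h2 : 2 ≤ pvD end_ cur := by unfold pvD; omega
    match n, hn with
    | n+1, hn =>
      obtain ⟨d, hd⟩ : ∃ d, pvD end_ cur = d + 1 := ⟨pvD end_ cur - 1, by omega⟩
      have hdn : d + 1 ≤ n + 1 := by omega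
      rw [hd, fA_succ, fA_succ]
      by_cases hb : cur = end_ ∧ pvFl cur flag = 0
      · rw [if_pos hb, if_pos hb]
      · rw [if_neg hb, if_neg hb]
        by_cases hgt : end_ < cur
        · rw [if_pos hgt, if_pos hgt]
        · rw [if_neg hgt, if_neg hgt]
          by_cases heq : cur = end_
          · -- both children are past the end
            have c1 : end_ < cur + 1 := by omega
            have c2 : end_ < cur * 2 := by nlinarith
            rw [fA_gt n _ _ _ (by omega) c1, fA_gt d _ _ _ (by omega) c2,
                fA_gt n _ _ _ (by omega) c2, fA_gt d _ _ _ (by omega) c1]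
          · have hlt : cur < end_ := by omega
            have k1 : pvD end_ (cur + 1) ≤ d := by unfold pvD at *; omega
            have k2 : pvD end_ (cur * 2) ≤ d := by
              unfold pvD at *
              have : cur + 1 ≤ cur * 2 := by nlinarith
              omega
            rw [IH n (by omega) (cur + 1) end_ _ (by omega) (by omega),
                IH n (by omega) (cur * 2) end_ _ (by omega) (by omega),
                IH d (by omega) (cur + 1) end_ _ (by omega) k1,
                IH d (by omega) (cur * 2) end_ _ (by omega) k2]

-- memo invariant: every stored value is the true (fully-fuelled) value of its state
def GoodM (end_ : Int) (m : PySem.Dict (Int × Int) Int) : Prop :=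
  ∀ k fl v, m.get? (k, fl) = some v → v = fA (pvD end_ k) k end_ fl

theorem goodM_empty (end_ : Int) : GoodM end_ PySem.Dict.empty := by
  intro k fl v h; simp [PySem.Dict.get?_empty] at h

theorem goodM_insert (end_ : Int) (m : PySem.Dict (Int × Int) Int) (cur flag v : Int)
    (hm : GoodM end_ m) (hv : v = fA (pvD end_ cur) cur end_ flag) :
    GoodM end_ (m.insert (cur, flag) v) := by
  intro k fl w h
  rw [PySem.Dict.get?_insert] at h
  by_cases hk : (k, fl) = (cur, flag)
  · rw [if_pos hk] at h
    obtain ⟨rfl, rfl⟩ := Prod.mk.injEq .. ▸ hk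
    cases h; exact hv
  · rw [if_neg hk] at h
    exact hm k fl w h

-- past the end, B returns 0 and preserves the invariant
theorem fB_gt (n : Nat) (cur end_ flag : Int) (m : PySem.Dict (Int × Int) Int)
    (h1 : 1 ≤ n) (h2 : end_ < cur) (hm : GoodM end_ m) :
    (fB n cur end_ flag m).1 = 0 ∧ GoodM end_ (fB n cur end_ flag m).2 := by
  match n, h1 with
  | n+1, _ =>
    rw [fB_succ]
    cases hget : m.get? (cur, flag) with
    | some v =>
      have hv := hm cur flag v hget
      rw [fA_gt _ _ _ _ (by unfold pvD; omega) h2] at hv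
      exact ⟨hv, hm⟩
    | none =>
      have hne : ¬ (cur = end_ ∧ pvFl cur flag = 0) := by rintro ⟨rfl, -⟩; omega
      dsimp only
      rw [if_neg hne, if_pos h2]
      exact ⟨rfl, goodM_insert _ _ _ _ _ hm
        (by rw [fA_gt _ _ _ _ (by unfold pvD; omega) h2])⟩

-- main lemma: with sufficient fuel and a sound memo, B computes A's value and
-- keeps the memo sound
theorem fB_correct (n : Nat) : ∀ (cur end_ flag : Int) (m : PySem.Dict (Int × Int) Int),
    1 ≤ cur → pvD end_ cur ≤ n → GoodM end_ m →
    (fB n cur end_ flag m).1 = fA (pvD end_ cur) cur end_ flag ∧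
      GoodM end_ (fB n cur end_ flag m).2 := by
  induction n using Nat.strong_induction_on with
  | _ n IH =>
    intro cur end_ flag m hcur hn hm
    have h2 : 2 ≤ pvD end_ cur := by unfold pvD; omega
    match n, hn with
    | n+1, hn =>
      obtain ⟨d, hd⟩ : ∃ d, pvD end_ cur = d + 1 := ⟨pvD end_ cur - 1, by omega⟩
      rw [fB_succ]
      cases hget : m.get? (cur, flag) with
      | some v => exact ⟨hm cur flag v hget, hm⟩
      | none =>
        dsimp only
        by_cases hb : cur = end_ ∧ pvFl cur flag = 0
        · rw [if_pos hb]
          have hval : fA (pvD end_ cur) cur end_ flag = 1 := by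
            rw [hd, fA_succ, if_pos hb]
          exact ⟨hval.symm, goodM_insert _ _ _ _ _ hm hval.symm⟩
        · rw [if_neg hb]
          by_cases hgt : end_ < cur
          · rw [if_pos hgt]
            have hval : fA (pvD end_ cur) cur end_ flag = 0 :=
              fA_gt _ _ _ _ (by omega) hgt
            exact ⟨hval.symm, goodM_insert _ _ _ _ _ hm hval.symm⟩
          · rw [if_neg hgt]
            have hAval : fA (pvD end_ cur) cur end_ flag =
                fA d (cur + 1) end_ (pvFl cur flag) + fA d (cur * 2) end_ (pvFl cur flag) := by
              rw [hd, fA_succ, if_neg hb, if_neg hgt]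
            by_cases heq : cur = end_
            · -- both children are past the end
              have c1 : end_ < cur + 1 := by omega
              have c2 : end_ < cur * 2 := by nlinarith
              obtain ⟨e1, g1⟩ := fB_gt n (cur + 1) end_ (pvFl cur flag) m (by omega) c1 hm
              obtain ⟨e2, g2⟩ := fB_gt n (cur * 2) end_ (pvFl cur flag) _ (by omega) c2 g1
              have hval : fA (pvD end_ cur) cur end_ flag =
                  (fB n (cur + 1) end_ (pvFl cur flag) m).1 +
                  (fB n (cur * 2) end_ (pvFl cur flag)
                    (fB n (cur + 1) end_ (pvFl cur flag) m).2).1 := by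
                rw [hAval, fA_gt d _ _ _ (by omega) c1, fA_gt d _ _ _ (by omega) c2, e1, e2]
              exact ⟨hval.symm, goodM_insert _ _ _ _ _ g2 hval.symm⟩
            · have hlt : cur < end_ := by omega
              have k1 : pvD end_ (cur + 1) ≤ d := by unfold pvD at *; omega
              have k2 : pvD end_ (cur * 2) ≤ d := by
                unfold pvD at *
                have : cur + 1 ≤ cur * 2 := by nlinarith
                omega
              obtain ⟨e1, g1⟩ := IH n (by omega) (cur + 1) end_ (pvFl cur flag) m
                (by omega) (by omega) hm
              obtain ⟨e2, g2⟩ := IH n (by omega) (cur * 2) end_ (pvFl cur flag) _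
                (by omega) (by omega) g1
              have hval : fA (pvD end_ cur) cur end_ flag =
                  (fB n (cur + 1) end_ (pvFl cur flag) m).1 +
                  (fB n (cur * 2) end_ (pvFl cur flag)
                    (fB n (cur + 1) end_ (pvFl cur flag) m).2).1 := by
                rw [hAval, fA_fuel d _ _ _ (by omega) k1, fA_fuel d _ _ _ (by omega) k2, e1, e2]
              exact ⟨hval.symm, goodM_insert _ _ _ _ _ g2 hval.symm⟩

-- ===== VERDICT (by name: the statement is the Claim_ definition above) =====
theorem f_spec : Claim_equal_f := by
  intro cur end_ flag _ hpre
  unfold Spec_f f f_alt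
  have hD : (end_ - cur).toNat + 2 = pvD end_ cur := rfl
  rw [hD]
  rcases hpre with hgt | hone | ⟨rfl, hfl⟩
  · -- start past the end: both sides are 0
    rw [fA_gt _ _ _ _ (by unfold pvD; omega) hgt]
    exact ((fB_gt _ _ _ _ _ (by unfold pvD; omega) hgt (goodM_empty _)).1).symm
  · -- terminating region: the memoized computation equals A's
    exact ((fB_correct _ cur end_ flag _ hone (le_refl _) (goodM_empty _)).1).symm
  · -- cur = end with zero effective flag: both sides are 1 immediately
    have hb : cur = cur ∧ pvFl cur flag = 0 := ⟨rfl, hfl⟩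
    obtain ⟨d, hd⟩ : ∃ d, pvD cur cur = d + 1 := ⟨pvD cur cur - 1, by unfold pvD; omega⟩
    rw [hd, fA_succ, if_pos hb, fB_succ, PySem.Dict.get?_empty]
    dsimp only
    rw [if_pos hb]
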